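-- pv_equiv track=rewrite | github.com/MingxuanChi/qbb2022-answers | week3-homework/VCF_plot.py | find_effect
-- ===== SOURCE A (Python) =====
-- def find_effect(eff_str):
-- 	effect_impact_list = list()
-- 	info_str_list = eff_str.split(',')
-- 	for info_str in info_str_list:
-- 		effect_impact_raw_list = info_str.split('|')
-- 		for i in effect_impact_raw_list:
-- 			if '(' in i:
-- 				effect_impact = i.split('(')[0]
-- 				effect_impact_list.append(effect_impact)
-- 	return effect_impact_list
-- ===== SOURCE B (Python) =====
-- def find_effect(eff_str):
--     # One character-level pass: a small state machine over the string instead of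
--     # A's two-level split passes building intermediate lists.
--     effect_impact_list = []
--     prefix = ''
--     seen_paren = False
--     for ch in eff_str:
--         if ch == ',' or ch == '|':
--             if seen_paren:
--                 effect_impact_list.append(prefix)
--             prefix = ''
--             seen_paren = False
--         elif ch == '(':
--             seen_paren = True
--         elif not seen_paren:
--             prefix += ch
--     if seen_paren:
--         effect_impact_list.append(prefix)
--     return effect_impact_list
-- ===== Notes on version B (the rewrite author's own statement) =====
-- stated objective: alternative
-- what changed: Replaces the two-level comma-then-pipe split passes and the per-token parenthesis split with a single character-level state machine that scans the string once, keeping the current token prefix and a seen-parenthesis flag.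
import Mathlib
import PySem

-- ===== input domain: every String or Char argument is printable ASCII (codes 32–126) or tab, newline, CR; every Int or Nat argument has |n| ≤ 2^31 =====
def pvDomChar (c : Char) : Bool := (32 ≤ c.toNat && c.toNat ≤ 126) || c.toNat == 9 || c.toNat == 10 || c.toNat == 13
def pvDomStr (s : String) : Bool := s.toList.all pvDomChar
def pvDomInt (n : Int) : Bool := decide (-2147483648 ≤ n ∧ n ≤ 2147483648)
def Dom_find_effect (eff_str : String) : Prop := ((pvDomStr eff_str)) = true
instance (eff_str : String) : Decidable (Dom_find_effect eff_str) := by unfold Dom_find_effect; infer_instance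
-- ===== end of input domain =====

-- B replaces A's two-level comma-then-pipe splitting and per-token parenthesis
-- split by a single character-level state machine over the string (objective: alternative).

-- ===== PORT A =====
-- Python's str.split with a non-empty literal separator never raises, so
-- split? is always `some` here and `.getD []` only discharges the Option;
-- indexing a split result at position zero never raises (split is non-empty), so pyGetD is exact.
def find_effect (eff_str : String) : List String :=
  ((PySem.Str.split? eff_str ",").getD []).foldl
    (fun effect_impact_list info_str =>
      ((PySem.Str.split? info_str "|").getD []).foldl
        (fun effect_impact_list i =>
          if PySem.Str.isIn "(" i then
            effect_impact_list ++ [PySem.List.pyGetD ((PySem.Str.split? i "(").getD []) 0 ""]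
          else effect_impact_list)
        effect_impact_list)
    []

-- ===== PORT B =====
-- the current token's kept prefix is built as a List Char and turned into a
-- String only when appended (Lean's String.push is opaque to the kernel);
-- state = (effect_impact_list, prefix, seen_paren)
def altStep (st : List String × List Char × Bool) (ch : Char) : List String × List Char × Bool :=
  if ch = ',' ∨ ch = '|' then
    ((if st.2.2 then st.1 ++ [String.ofList st.2.1] else st.1), [], false)
  else if ch = '(' then
    (st.1, st.2.1, true)
  else if st.2.2 then
    st
  else
    (st.1, st.2.1 ++ [ch], st.2.2)

def altFinish (st : List String × List Char × Bool) : List String :=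
  if st.2.2 then st.1 ++ [String.ofList st.2.1] else st.1

def find_effect_alt (eff_str : String) : List String :=
  altFinish (eff_str.toList.foldl altStep ([], [], false))

-- ===== PRECONDITION & SPEC =====
def Spec_find_effect (eff_str : String) (out : List String) : Prop := out = find_effect_alt eff_str
instance (eff_str : String) (out : List String) : Decidable (Spec_find_effect eff_str out) := by unfold Spec_find_effect; infer_instance

-- ===== CLAIM (what is proved, stated in full; the proofs are below) =====
def Claim_equal_find_effect : Prop := ∀ (eff_str : String), Dom_find_effect eff_str → Spec_find_effect eff_str (find_effect eff_str)

-- ===== LEMMAS AND PROOFS =====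

-- clean structural splitter: (head piece, remaining pieces) of splitting on p
def spGo (p : Char → Bool) : List Char → List Char × List (List Char)
  | [] => ([], [])
  | c :: cs =>
    let r := spGo p cs
    if p c then ([], r.1 :: r.2) else (c :: r.1, r.2)

def qB (c : Char) : Bool := c == ',' || c == '|'

def emitTok (t : List Char) : List String :=
  if '(' ∈ t then [String.ofList (t.takeWhile (· ≠ '('))] else []

lemma spGo_nil (p : Char → Bool) : spGo p [] = ([], []) := rfl

lemma spGo_cons (p : Char → Bool) (c : Char) (cs : List Char) :
    spGo p (c :: cs) =
      if p c then ([], (spGo p cs).1 :: (spGo p cs).2)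
      else (c :: (spGo p cs).1, (spGo p cs).2) := rfl

-- PySem.Chars.splitOn.go with enough fuel computes spGo
lemma splitOn_go_eq (d : Char) (l : List Char) :
    ∀ (fuel : Nat), l.length ≤ fuel → ∀ (cur : List Char) (acc : List (List Char)),
      PySem.Chars.splitOn.go [d] fuel l cur acc =
        acc.reverse ++ (cur.reverse ++ (spGo (· == d) l).1) :: (spGo (· == d) l).2 := by
  induction l with
  | nil =>
    intro fuel _ cur acc
    cases fuel <;> simp [PySem.Chars.splitOn.go, spGo_nil]
  | cons c rest ih =>
    intro fuel hf cur acc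
    cases fuel with
    | zero => simp at hf
    | succ f =>
      have hr : rest.length ≤ f := by simpa using hf
      by_cases hc : d = c
      · subst hc
        simp only [PySem.Chars.splitOn.go, List.isPrefixOf,
          Bool.and_true, beq_self_eq_true, if_pos, spGo_cons]
        have hdrop : List.drop [d].length (d :: rest) = rest := rfl
        rw [hdrop, ih f hr [] (cur.reverse :: acc)]
        simp
      · have hne : ([d].isPrefixOf (c :: rest)) = false := by
          simp [List.isPrefixOf, hc]
        simp only [PySem.Chars.splitOn.go, hne, Bool.false_eq_true, if_false, spGo_cons]
        rw [ih f hr (c :: cur) acc]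
        have : (c = d) = False := by simp [Ne.symm hc]
        simp [beq_iff_eq, this]

lemma splitOn_eq_spGo (d : Char) (cs : List Char) :
    PySem.Chars.splitOn cs [d] = (spGo (· == d) cs).1 :: (spGo (· == d) cs).2 := by
  unfold PySem.Chars.splitOn
  rw [splitOn_go_eq d cs (cs.length + 1) (by omega) [] []]
  simp

-- splitting on ',' then '|' is splitting on both at once
lemma split_comp_aux (cs : List Char) :
    (spGo (· == '|') (spGo (· == ',') cs).1).1 = (spGo qB cs).1 ∧
    (spGo (· == '|') (spGo (· == ',') cs).1).2 ++
        (spGo (· == ',') cs).2.flatMap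
          (fun p => (spGo (· == '|') p).1 :: (spGo (· == '|') p).2) =
      (spGo qB cs).2 := by
  induction cs with
  | nil => simp [spGo_nil]
  | cons c cs ih =>
    obtain ⟨ih1, ih2⟩ := ih
    by_cases h1 : c = ','
    · subst h1
      simp [spGo_cons, spGo_nil, qB, List.flatMap_cons, ih1, ih2]
    · by_cases h2 : c = '|'
      · subst h2
        simp [spGo_cons, qB, show (('|' == ',') : Bool) = false by decide, ih1, ih2]
      · have hq : qB c = false := by simp [qB, h1, h2]
        simp [spGo_cons, hq, show ((c == ',') : Bool) = false by simp [h1],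
          show ((c == '|') : Bool) = false by simp [h2], ih1, ih2]

lemma split_comp (cs : List Char) :
    ((spGo (· == ',') cs).1 :: (spGo (· == ',') cs).2).flatMap
        (fun p => (spGo (· == '|') p).1 :: (spGo (· == '|') p).2) =
      (spGo qB cs).1 :: (spGo qB cs).2 := by
  obtain ⟨h1, h2⟩ := split_comp_aux cs
  simp only [List.flatMap_cons, List.cons_append, h1]
  rw [h2]

-- B's inner three branches as a fold over one token's characters
def consume (st : List Char × Bool) (t : List Char) : List Char × Bool :=
  t.foldl
    (fun (pr : List Char × Bool) ch =>
      if ch = '(' then (pr.1, true)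
      else if pr.2 then (pr.1, pr.2)
      else (pr.1 ++ [ch], pr.2))
    st

def flush (st : List Char × Bool) : List String :=
  if st.2 then [String.ofList st.1] else []

lemma consume_true (p : List Char) (t : List Char) : consume (p, true) t = (p, true) := by
  induction t with
  | nil => rfl
  | cons c t ih =>
    unfold consume at ih ⊢
    rw [List.foldl_cons]
    simpa using ih

lemma consume_false (p : List Char) (t : List Char) :
    consume (p, false) t = (p ++ t.takeWhile (· ≠ '('), decide ('(' ∈ t)) := by
  induction t generalizing p with
  | nil => simp [consume]
  | cons c t ih =>
    by_cases hc : c = '('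
    · subst hc
      have : consume (p, false) ('(' :: t) = consume (p, true) t := by simp [consume]
      rw [this, consume_true]
      simp
    · have : consume (p, false) (c :: t) = consume (p ++ [c], false) t := by
        simp [consume, hc]
      rw [this, ih]
      have hc' : ¬ '(' = c := fun h => hc h.symm
      simp [hc, hc']

lemma flush_consume (t : List Char) : flush (consume ([], false) t) = emitTok t := by
  rw [consume_false]
  by_cases h : '(' ∈ t <;> simp [flush, emitTok, h]

-- B's whole loop, generalized over the starting state
lemma alt_loop (cs : List Char) :
    ∀ (res : List String) (pre : List Char) (seen : Bool),
      altFinish (cs.foldl altStep (res, pre, seen)) =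
        res ++ flush (consume (pre, seen) (spGo qB cs).1) ++
          (spGo qB cs).2.flatMap (fun t => flush (consume ([], false) t)) := by
  induction cs with
  | nil =>
    intro res pre seen
    have : consume (pre, seen) [] = (pre, seen) := rfl
    simp [spGo_nil, altFinish, flush, this]
    split_ifs <;> simp
  | cons c cs ih =>
    intro res pre seen
    rw [List.foldl_cons]
    by_cases hq : c = ',' ∨ c = '|'
    · have hqb : qB c = true := by rcases hq with h | h <;> simp [qB, h]
      have hstep : altStep (res, pre, seen) c =
          ((if seen then res ++ [String.ofList pre] else res), [], false) := by
        simp [altStep, hq]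
      rw [hstep, ih]
      simp only [spGo_cons, hqb, if_pos]
      have hfl : (if seen then res ++ [String.ofList pre] else res) = res ++ flush (pre, seen) := by
        by_cases hs : seen <;> simp [flush, hs]
      have hc1 : consume (pre, seen) [] = (pre, seen) := rfl
      rw [hfl, hc1]
      simp [List.flatMap_cons, List.append_assoc]
    · have hqb : qB c = false := by
        rcases not_or.mp hq with ⟨h1, h2⟩
        simp [qB, h1, h2]
      by_cases hp : c = '('
      · subst hp
        have hstep : altStep (res, pre, seen) '(' = (res, pre, true) := by
          simp [altStep]
        rw [hstep, ih]
        simp only [spGo_cons, hqb, Bool.false_eq_true, if_false]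
        have : consume (pre, seen) ('(' :: (spGo qB cs).1) = consume (pre, true) (spGo qB cs).1 := by
          simp [consume]
        rw [this]
      · by_cases hs : seen
        · have hseen : seen = true := hs
          subst hseen
          have hstep : altStep (res, pre, true) c = (res, pre, true) := by
            simp [altStep, hq, hp]
          rw [hstep, ih]
          simp only [spGo_cons, hqb, Bool.false_eq_true, if_false]
          have : consume (pre, true) (c :: (spGo qB cs).1) = consume (pre, true) (spGo qB cs).1 := by
            simp [consume, hp]
          rw [this]
        · have hseen : seen = false := by simpa using hs
          subst hseen
          have hstep : altStep (res, pre, false) c = (res, pre ++ [c], false) := by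
            simp [altStep, hq, hp]
          rw [hstep, ih]
          simp only [spGo_cons, hqb, Bool.false_eq_true, if_false]
          have : consume (pre, false) (c :: (spGo qB cs).1) = consume (pre ++ [c], false) (spGo qB cs).1 := by
            simp [consume, hp]
          rw [this]

lemma alt_eq_canonical (s : String) :
    find_effect_alt s =
      ((spGo qB s.toList).1 :: (spGo qB s.toList).2).flatMap emitTok := by
  unfold find_effect_alt
  rw [alt_loop s.toList [] [] false]
  simp [flush_consume, List.flatMap_cons]

lemma map_filter_eq_flatMap {α β : Type} (p : α → Bool) (f : α → β) (ts : List α) :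
    List.map f (List.filter p ts) = ts.flatMap (fun t => if p t then [f t] else []) := by
  induction ts with
  | nil => rfl
  | cons t ts ih =>
    by_cases h : p t <;> simp [h, ih]

lemma isIn_paren (t : List Char) : PySem.Chars.isIn ['('] t = decide ('(' ∈ t) := by
  by_cases h : '(' ∈ t
  · simp [h, (PySem.Chars.isIn_iff_infix ['('] t).mpr ((List.singleton_infix_iff _ _).mpr h)]
  · have : ¬ (['('] <:+: t) := by simpa [List.singleton_infix_iff] using h
    simp [h]
    rcases hb : PySem.Chars.isIn ['('] t with _ | _
    · rfl
    · exact absurd ((PySem.Chars.isIn_iff_infix ['('] t).mp hb) this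

lemma spGo_fst_paren (t : List Char) : (spGo (· == '(') t).1 = t.takeWhile (· ≠ '(') := by
  induction t with
  | nil => rfl
  | cons c t ih =>
    by_cases h : c = '(' <;> simp [spGo_cons, h, ih]

-- A's per-item emission equals emitTok
lemma a_emit (t : List Char) :
    (if PySem.Str.isIn "(" (String.ofList t) then
        [PySem.List.pyGetD ((PySem.Str.split? (String.ofList t) "(").getD []) 0 ""]
      else ([] : List String)) = emitTok t := by
  have hin : PySem.Str.isIn "(" (String.ofList t) = decide ('(' ∈ t) := by
    simpa [PySem.Str.isIn] using isIn_paren t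
  by_cases h : '(' ∈ t
  · simp only [hin, h, decide_true, if_pos, emitTok]
    simp [PySem.Str.split?, PySem.Chars.split?, splitOn_eq_spGo, spGo_fst_paren,
      PySem.List.pyGetD]
  · rw [hin]
    simp [h, emitTok]

lemma a_eq_canonical (s : String) :
    find_effect s =
      ((spGo qB s.toList).1 :: (spGo qB s.toList).2).flatMap emitTok := by
  unfold find_effect
  have hsplit : ∀ (u : String) (d : Char),
      (PySem.Str.split? u (String.ofList [d])).getD [] =
        ((spGo (· == d) u.toList).1 :: (spGo (· == d) u.toList).2).map String.ofList := by
    intro u d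
    simp [PySem.Str.split?, PySem.Chars.split?, splitOn_eq_spGo]
  have h1 := hsplit s ','
  simp only [show String.ofList [','] = "," from rfl] at h1
  rw [h1]
  -- inner loop: foldl with append-if = append map/filter
  have inner : ∀ (info : String) (acc : List String),
      ((PySem.Str.split? info "|").getD []).foldl
        (fun effect_impact_list i =>
          if PySem.Str.isIn "(" i then
            effect_impact_list ++ [PySem.List.pyGetD ((PySem.Str.split? i "(").getD []) 0 ""]
          else effect_impact_list) acc =
      acc ++ ((spGo (· == '|') info.toList).1 :: (spGo (· == '|') info.toList).2).flatMap emitTok := by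
    intro info acc
    have h2 := hsplit info '|'
    simp only [show String.ofList ['|'] = "|" from rfl] at h2
    rw [h2, PySem.List.foldl_append_if, map_filter_eq_flatMap, List.flatMap_map]
    congr 1
    apply List.flatMap_congr  -- pointwise
    intro t _
    exact a_emit t
  -- outer loop
  rw [List.foldl_map]
  have hfun :
      (fun (acc : List String) (t : List Char) =>
        ((PySem.Str.split? (String.ofList t) "|").getD []).foldl
          (fun effect_impact_list i =>
            if PySem.Str.isIn "(" i then
              effect_impact_list ++ [PySem.List.pyGetD ((PySem.Str.split? i "(").getD []) 0 ""]
            else effect_impact_list) acc) =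
      (fun acc t =>
        acc ++ ((spGo (· == '|') t).1 :: (spGo (· == '|') t).2).flatMap emitTok) := by
    funext acc t
    simpa using inner (String.ofList t) acc
  rw [hfun, PySem.List.foldl_append_eq_flatMap]
  rw [← List.flatMap_assoc, split_comp]
  simp

-- ===== VERDICT (by name: the statement is the Claim_ definition above) =====
theorem find_effect_spec : Claim_equal_find_effect := by
  intro s _
  unfold Spec_find_effect
  rw [a_eq_canonical, alt_eq_canonical]
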